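-- pv_equiv track=rewrite | github.com/baka-44/esm3-protein-prompter | utils/sequence_utils.py | build_masked_sequence
-- ===== SOURCE A (Python) =====
-- def build_masked_sequence(
--     protein_length: int,
--     fixed_residues: dict[int, str],
-- ) -> str:
--     """
--     Build an ESM3-compatible masked sequence string.
--
--     Args:
--         protein_length:  Total length of the sequence.
--         fixed_residues:  Mapping of {0-based position: single-letter AA}.
--                          Positions not in this dict are masked with '_'.
--
--     Returns:
--         String of length protein_length with known AAs at fixed positions
--         and '_' elsewhere.
--
--     Example:
--         build_masked_sequence(10, {2: "G", 5: "K"})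
--         → "__G__K____"
--     """
--     seq = ["_"] * protein_length
--     for pos, aa in fixed_residues.items():
--         if 0 <= pos < protein_length:
--             seq[pos] = aa.upper()
--     return "".join(seq)
-- ===== SOURCE B (Python) =====
-- def build_masked_sequence(
--     protein_length: int,
--     fixed_residues: dict[int, str],
-- ) -> str:
--     """Single pass over positions: lookup per index instead of init-then-overwrite."""
--     return "".join(
--         fixed_residues[i].upper() if i in fixed_residues else "_"
--         for i in range(protein_length)
--     )
-- ===== Notes on version B (the rewrite author's own statement) =====
-- stated objective: simpler
-- what changed: Instead of allocating a list of '_' and iterating the dict to overwrite in-range positions, B makes a single pass over range(protein_length) with a membership lookup per position and joins directly; out-of-range keys are ignored because range excludes them. Pre_ only excludes association lists with duplicate keys, which do not represent any Python dict, so no Python input is excluded.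
import Mathlib
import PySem

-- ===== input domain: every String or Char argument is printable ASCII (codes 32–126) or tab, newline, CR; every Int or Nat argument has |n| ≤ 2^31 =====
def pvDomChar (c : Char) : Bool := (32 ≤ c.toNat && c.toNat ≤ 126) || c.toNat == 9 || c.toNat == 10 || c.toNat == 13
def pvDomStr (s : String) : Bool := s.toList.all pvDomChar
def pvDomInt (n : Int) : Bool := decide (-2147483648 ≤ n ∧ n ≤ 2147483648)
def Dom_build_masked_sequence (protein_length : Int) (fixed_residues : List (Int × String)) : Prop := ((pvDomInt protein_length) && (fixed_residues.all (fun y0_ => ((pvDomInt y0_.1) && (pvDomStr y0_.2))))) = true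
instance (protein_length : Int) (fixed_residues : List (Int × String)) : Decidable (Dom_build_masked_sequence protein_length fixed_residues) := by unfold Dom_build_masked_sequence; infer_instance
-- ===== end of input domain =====

-- B replaces A's init-then-overwrite list with a single pass over positions (lookup per index), for simplicity.


-- ===== PORT A =====
-- seq = ["_"] * protein_length; for pos, aa in fixed_residues.items(): if 0 <= pos < protein_length: seq[pos] = aa.upper(); return "".join(seq)
def build_masked_sequence (protein_length : Int) (fixed_residues : List (Int × String)) : String :=
  let seq := PySem.List.pyRepeat ["_"] protein_length
  let seq := fixed_residues.foldl
    (fun s pv => if 0 ≤ pv.1 ∧ pv.1 < protein_length then s.set pv.1.toNat (PySem.Str.upper pv.2) else s) seq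
  PySem.Str.join "" seq

-- ===== PORT B =====
-- "".join(fixed_residues[i].upper() if i in fixed_residues else "_" for i in range(protein_length))
def build_masked_sequence_alt (protein_length : Int) (fixed_residues : List (Int × String)) : String :=
  PySem.Str.join ""
    ((PySem.List.pyRange 0 protein_length 1).map (fun i =>
      match fixed_residues.lookup i with
      | some aa => PySem.Str.upper aa
      | none => "_"))

-- ===== PRECONDITION & SPEC =====
-- Pre_ only excludes association lists with duplicate keys, which do not represent any Python dict
-- (A's argument is a dict, so no Python input is excluded).
def Pre_build_masked_sequence (protein_length : Int) (fixed_residues : List (Int × String)) : Prop :=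
  (fixed_residues.map Prod.fst).Nodup
instance (protein_length : Int) (fixed_residues : List (Int × String)) : Decidable (Pre_build_masked_sequence protein_length fixed_residues) := by unfold Pre_build_masked_sequence; infer_instance

def pvWitness_build_masked_sequence : Int × (List (Int × String)) := (5, [(1, "g"), (3, "K")])

def Spec_build_masked_sequence (protein_length : Int) (fixed_residues : List (Int × String)) (out : String) : Prop := out = build_masked_sequence_alt protein_length fixed_residues
instance (protein_length : Int) (fixed_residues : List (Int × String)) (out : String) : Decidable (Spec_build_masked_sequence protein_length fixed_residues out) := by unfold Spec_build_masked_sequence; infer_instance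

-- ===== CLAIM =====
def Claim_equal_build_masked_sequence : Prop := ∀ (protein_length : Int) (fixed_residues : List (Int × String)), Dom_build_masked_sequence protein_length fixed_residues → Pre_build_masked_sequence protein_length fixed_residues → Spec_build_masked_sequence protein_length fixed_residues (build_masked_sequence protein_length fixed_residues)

-- ===== LEMMAS AND PROOFS =====

theorem bms_foldl_length (pl : Int) (fr : List (Int × String)) (seq : List String) :
    (fr.foldl (fun s pv => if 0 ≤ pv.1 ∧ pv.1 < pl then s.set pv.1.toNat (PySem.Str.upper pv.2) else s) seq).length = seq.length := by
  induction fr generalizing seq with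
  | nil => rfl
  | cons p rest ih =>
    simp only [List.foldl_cons]
    rw [ih]
    split <;> simp

theorem bms_foldl_getElem? (pl : Int) (fr : List (Int × String))
    (hnd : (fr.map Prod.fst).Nodup) (seq : List String) (k : Nat) (hk : (k : Int) < pl) :
    (fr.foldl (fun s pv => if 0 ≤ pv.1 ∧ pv.1 < pl then s.set pv.1.toNat (PySem.Str.upper pv.2) else s) seq)[k]? =
      match fr.lookup (k : Int) with
      | some aa => if k < seq.length then some (PySem.Str.upper aa) else none
      | none => seq[k]? := by
  induction fr generalizing seq with
  | nil =>
    simp [List.lookup]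
  | cons p rest ih =>
    obtain ⟨pk, pv⟩ := p
    simp only [List.map_cons, List.nodup_cons] at hnd
    obtain ⟨hp, hrest⟩ := hnd
    simp only [List.foldl_cons]
    rw [ih hrest]
    by_cases hek : pk = (k : Int)
    · -- this entry sets position k; rest never touches key k (nodup)
      subst hek
      have hguard : (0 : Int) ≤ (k : Int) ∧ (k : Int) < pl := ⟨Int.natCast_nonneg k, hk⟩
      rw [if_pos hguard]
      have hlk : rest.lookup ((k : Nat) : Int) = none := by
        rw [List.lookup_eq_none_iff]
        intro q hq
        have : q.1 ≠ ((k : Nat) : Int) := fun h => hp (h ▸ List.mem_map_of_mem hq)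
        simpa [bne_iff_ne] using this.symm
      rw [hlk]
      simp only [List.lookup, beq_self_eq_true, Int.toNat_natCast]
      by_cases hl : k < seq.length
      · rw [List.getElem?_set_self (by simpa using hl)]
        simp [hl]
      · rw [List.getElem?_eq_none (by simpa [Nat.not_lt] using hl)]
        simp [hl]
    · -- different key: position k of seq unchanged by this step
      have hbeq : ((k : Int) == pk) = false := by simpa using fun h => hek h.symm
      have hunch : (if 0 ≤ pk ∧ pk < pl then seq.set pk.toNat (PySem.Str.upper pv) else seq)[k]? = seq[k]? := by
        split
        · rename_i hg
          exact List.getElem?_set_ne (by omega)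
        · rfl
      have hlen : (if 0 ≤ pk ∧ pk < pl then seq.set pk.toNat (PySem.Str.upper pv) else seq).length = seq.length := by
        split <;> simp
      simp only [List.lookup, hbeq]
      cases hrl : rest.lookup (k : Int) with
      | some aa => simp [hlen]
      | none => simp [hunch]

theorem bms_main (pl : Int) (fr : List (Int × String)) (hnd : (fr.map Prod.fst).Nodup) :
    build_masked_sequence pl fr = build_masked_sequence_alt pl fr := by
  show PySem.Str.join ""
      (fr.foldl (fun s pv => if 0 ≤ pv.1 ∧ pv.1 < pl then s.set pv.1.toNat (PySem.Str.upper pv.2) else s)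
        (PySem.List.pyRepeat ["_"] pl)) = _
  rw [build_masked_sequence_alt, PySem.List.pyRepeat_singleton]
  congr 1
  by_cases hpl : 0 ≤ pl
  · have hcast : pl = ((pl.toNat : Nat) : Int) := (Int.toNat_of_nonneg hpl).symm
    rw [hcast]
    apply List.ext_getElem?
    intro k
    by_cases hk : k < pl.toNat
    · rw [bms_foldl_getElem? _ fr hnd _ k (by omega)]
      rw [PySem.List.getElem?_map_pyRange_zero _ _ _ hk]
      simp only [Int.toNat_natCast, List.length_replicate, hk]
      cases hlk : fr.lookup (k : Int) with
      | some aa => simp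
      | none => simp [hk]
    · rw [List.getElem?_eq_none (by rw [bms_foldl_length]; simpa using hk)]
      rw [List.getElem?_eq_none]
      simp only [List.length_map, PySem.List.length_pyRange_one]
      omega
  · have h1 : pl.toNat = 0 := by omega
    have h2 : PySem.List.pyRange 0 pl 1 = [] := PySem.List.pyRange_one_eq_nil (by omega)
    have hl := bms_foldl_length pl fr []
    simp only [List.length_nil] at hl
    simp [h1, h2, List.eq_nil_of_length_eq_zero hl]

-- ===== VERDICT =====
theorem build_masked_sequence_spec : Claim_equal_build_masked_sequence := by
  intro pl fr _ hpre
  exact bms_main pl fr hpre
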